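-- pv_equiv track=rewrite | github.com/sdorsetti/NLP_project | labellisation/utils.py | regroup_hash
-- ===== SOURCE A (Python) =====
-- def regroup_hash(lst) :
--
--   liste=[]
--   new_k=[]
--   for item in lst:
--         if item in ['tokyo2020']:
--             liste.append('Tokyo2020')
--         if item in ['olympics','olympicGames']:
--           liste.append('Olympics')
--         if item in ['tokyoolympics','tokyoolympics2021']:
--           liste.append('TokyoOlympics')
--         if item in ['teamindia','cheer4india']:
--           liste.append('TeamIndia')
--         if item in ['ind','india']:
--           liste.append('India')
--         if item in ['mirabaichanu','mirabachanu','mirabai','mirabai_chanu','mirabaichanu', 'mirabhaichanu', 'mirabi_chanu', 'mirrabaichanu', 'merabaichanu']: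
--           liste.append('MirabaiChanu')
--         if item == 'swevaus':
--           liste.append('SWEvAUS')
--         if item == 'uswnt':
--           liste.append('USWNT')
--         if item == 'weightlifting':
--           liste.append('Weightlifting')
--         if item == 'swimming':
--           liste.append('Swimming')
--         if item == 'football':
--           liste.append('Football')
--         if item == 'teamgb':
--           liste.append('TeamGB')
--         if item == 'badminton':
--           liste.append('Badminton')
--         if item == 'hockey':
--           liste.append('Hockey')
--         if item == 'silver':
--           liste.append('Silver')
--   for elem in liste:
--       if elem not in new_k:
--         new_k.append(elem)
--   liste = new_k
--   return liste
-- ===== SOURCE B (Python) =====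
-- # Table-driven rewrite: one token->label dict replaces the 15-branch if-chain,
-- # and a single fused pass does map + order-preserving dedup together.
-- _MAPPING = {
--     'tokyo2020': 'Tokyo2020',
--     'olympics': 'Olympics', 'olympicGames': 'Olympics',
--     'tokyoolympics': 'TokyoOlympics', 'tokyoolympics2021': 'TokyoOlympics',
--     'teamindia': 'TeamIndia', 'cheer4india': 'TeamIndia',
--     'ind': 'India', 'india': 'India',
--     'mirabaichanu': 'MirabaiChanu', 'mirabachanu': 'MirabaiChanu',
--     'mirabai': 'MirabaiChanu', 'mirabai_chanu': 'MirabaiChanu',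
--     'mirabhaichanu': 'MirabaiChanu', 'mirabi_chanu': 'MirabaiChanu',
--     'mirrabaichanu': 'MirabaiChanu', 'merabaichanu': 'MirabaiChanu',
--     'swevaus': 'SWEvAUS', 'uswnt': 'USWNT',
--     'weightlifting': 'Weightlifting', 'swimming': 'Swimming',
--     'football': 'Football', 'teamgb': 'TeamGB',
--     'badminton': 'Badminton', 'hockey': 'Hockey', 'silver': 'Silver',
-- }
--
-- def regroup_hash(lst):
--     seen = set()
--     result = []
--     for item in lst:
--         label = _MAPPING.get(item)
--         if label is not None and label not in seen:
--             seen.add(label)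
--             result.append(label)
--     return result
-- ===== Notes on version B (the rewrite author's own statement) =====
-- stated objective: simpler
-- what changed: Replaces the 15-branch if-chain plus a separate list-membership dedup pass with one token-to-label dict and a single fused pass keeping a seen-set, so each item is hashed once and labels are emitted deduplicated on the fly.
import Mathlib
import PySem

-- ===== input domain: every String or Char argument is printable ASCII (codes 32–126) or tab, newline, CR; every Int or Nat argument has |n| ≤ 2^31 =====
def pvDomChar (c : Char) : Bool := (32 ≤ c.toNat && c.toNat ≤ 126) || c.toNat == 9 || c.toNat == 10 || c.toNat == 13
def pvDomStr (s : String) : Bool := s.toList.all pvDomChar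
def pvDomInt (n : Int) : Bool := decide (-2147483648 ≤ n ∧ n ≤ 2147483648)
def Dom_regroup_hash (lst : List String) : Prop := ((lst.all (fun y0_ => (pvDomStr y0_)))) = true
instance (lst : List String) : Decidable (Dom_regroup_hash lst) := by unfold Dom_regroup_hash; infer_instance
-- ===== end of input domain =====

-- B replaces A's 15-branch if-chain plus separate dedup pass with a token->label dict and one
-- fused pass keeping a seen-set (objective: simpler).

-- ===== PORT A =====
-- literal transliteration of A's per-item if-chain (each `if` may append to liste)
def pvStepA (liste : List String) (item : String) : List String :=
  let liste := if item ∈ ["tokyo2020"] then liste ++ ["Tokyo2020"] else liste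
  let liste := if item ∈ ["olympics", "olympicGames"] then liste ++ ["Olympics"] else liste
  let liste := if item ∈ ["tokyoolympics", "tokyoolympics2021"] then liste ++ ["TokyoOlympics"] else liste
  let liste := if item ∈ ["teamindia", "cheer4india"] then liste ++ ["TeamIndia"] else liste
  let liste := if item ∈ ["ind", "india"] then liste ++ ["India"] else liste
  let liste := if item ∈ ["mirabaichanu", "mirabachanu", "mirabai", "mirabai_chanu", "mirabaichanu", "mirabhaichanu", "mirabi_chanu", "mirrabaichanu", "merabaichanu"] then liste ++ ["MirabaiChanu"] else liste
  let liste := if item = "swevaus" then liste ++ ["SWEvAUS"] else liste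
  let liste := if item = "uswnt" then liste ++ ["USWNT"] else liste
  let liste := if item = "weightlifting" then liste ++ ["Weightlifting"] else liste
  let liste := if item = "swimming" then liste ++ ["Swimming"] else liste
  let liste := if item = "football" then liste ++ ["Football"] else liste
  let liste := if item = "teamgb" then liste ++ ["TeamGB"] else liste
  let liste := if item = "badminton" then liste ++ ["Badminton"] else liste
  let liste := if item = "hockey" then liste ++ ["Hockey"] else liste
  let liste := if item = "silver" then liste ++ ["Silver"] else liste
  liste

def regroup_hash (lst : List String) : List String :=
  let liste := lst.foldl pvStepA []
  let new_k := liste.foldl (fun new_k elem => if elem ∈ new_k then new_k else new_k ++ [elem]) []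
  new_k

-- ===== PORT B =====
def pvMapping : PySem.Dict String String := PySem.Dict.mk [("tokyo2020", "Tokyo2020"), ("olympics", "Olympics"), ("olympicGames", "Olympics"), ("tokyoolympics", "TokyoOlympics"), ("tokyoolympics2021", "TokyoOlympics"), ("teamindia", "TeamIndia"), ("cheer4india", "TeamIndia"), ("ind", "India"), ("india", "India"), ("mirabaichanu", "MirabaiChanu"), ("mirabachanu", "MirabaiChanu"), ("mirabai", "MirabaiChanu"), ("mirabai_chanu", "MirabaiChanu"), ("mirabhaichanu", "MirabaiChanu"), ("mirabi_chanu", "MirabaiChanu"), ("mirrabaichanu", "MirabaiChanu"), ("merabaichanu", "MirabaiChanu"), ("swevaus", "SWEvAUS"), ("uswnt", "USWNT"), ("weightlifting", "Weightlifting"), ("swimming", "Swimming"), ("football", "Football"), ("teamgb", "TeamGB"), ("badminton", "Badminton"), ("hockey", "Hockey"), ("silver", "Silver")]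

-- one fused pass: look the item up, skip unmapped tokens and already-seen labels
def pvStepB (st : PySem.Set String × List String) (item : String) : PySem.Set String × List String :=
  match pvMapping.get? item with
  | none => st
  | some label => if PySem.Set.contains st.1 label then st else (PySem.Set.add st.1 label, st.2 ++ [label])

def regroup_hash_alt (lst : List String) : List String :=
  (lst.foldl pvStepB (PySem.Set.empty, [])).2

-- ===== PRECONDITION & SPEC =====
def Spec_regroup_hash (lst : List String) (out : List String) : Prop := out = regroup_hash_alt lst
instance (lst : List String) (out : List String) : Decidable (Spec_regroup_hash lst out) := by unfold Spec_regroup_hash; infer_instance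

-- ===== CLAIM (what is proved, stated in full; the proofs are below) =====
def Claim_equal_regroup_hash : Prop := ∀ (lst : List String), Dom_regroup_hash lst → Spec_regroup_hash lst (regroup_hash lst)

-- ===== LEMMAS AND PROOFS =====

-- A's if-chain on one item appends exactly the label B's dict gives that item (the keys are disjoint)
theorem pvStepA_eq_get (acc : List String) (item : String) :
    pvStepA acc item = acc ++ (pvMapping.get? item).toList := by
  by_cases h0 : item = "tokyo2020"
  · subst h0; rfl
  by_cases h1 : item = "olympics"
  · subst h1; rfl
  by_cases h2 : item = "olympicGames"
  · subst h2; rfl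
  by_cases h3 : item = "tokyoolympics"
  · subst h3; rfl
  by_cases h4 : item = "tokyoolympics2021"
  · subst h4; rfl
  by_cases h5 : item = "teamindia"
  · subst h5; rfl
  by_cases h6 : item = "cheer4india"
  · subst h6; rfl
  by_cases h7 : item = "ind"
  · subst h7; rfl
  by_cases h8 : item = "india"
  · subst h8; rfl
  by_cases h9 : item = "mirabaichanu"
  · subst h9; rfl
  by_cases h10 : item = "mirabachanu"
  · subst h10; rfl
  by_cases h11 : item = "mirabai"
  · subst h11; rfl
  by_cases h12 : item = "mirabai_chanu"
  · subst h12; rfl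
  by_cases h13 : item = "mirabhaichanu"
  · subst h13; rfl
  by_cases h14 : item = "mirabi_chanu"
  · subst h14; rfl
  by_cases h15 : item = "mirrabaichanu"
  · subst h15; rfl
  by_cases h16 : item = "merabaichanu"
  · subst h16; rfl
  by_cases h17 : item = "swevaus"
  · subst h17; rfl
  by_cases h18 : item = "uswnt"
  · subst h18; rfl
  by_cases h19 : item = "weightlifting"
  · subst h19; rfl
  by_cases h20 : item = "swimming"
  · subst h20; rfl
  by_cases h21 : item = "football"
  · subst h21; rfl
  by_cases h22 : item = "teamgb"
  · subst h22; rfl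
  by_cases h23 : item = "badminton"
  · subst h23; rfl
  by_cases h24 : item = "hockey"
  · subst h24; rfl
  by_cases h25 : item = "silver"
  · subst h25; rfl
  simp [pvStepA, pvMapping, PySem.Dict.get?, h0, Ne.symm h0, h1, Ne.symm h1, h2, Ne.symm h2, h3, Ne.symm h3, h4, Ne.symm h4, h5, Ne.symm h5, h6, Ne.symm h6, h7, Ne.symm h7, h8, Ne.symm h8, h9, Ne.symm h9, h10, Ne.symm h10, h11, Ne.symm h11, h12, Ne.symm h12, h13, Ne.symm h13, h14, Ne.symm h14, h15, Ne.symm h15, h16, Ne.symm h16, h17, Ne.symm h17, h18, Ne.symm h18, h19, Ne.symm h19, h20, Ne.symm h20, h21, Ne.symm h21, h22, Ne.symm h22, h23, Ne.symm h23, h24, Ne.symm h24, h25, Ne.symm h25]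

-- A's first loop builds the filterMap of the dict lookup
theorem pvFoldA_eq_filterMap (lst acc : List String) :
    lst.foldl pvStepA acc = acc ++ lst.filterMap (fun it => pvMapping.get? it) := by
  induction lst generalizing acc with
  | nil => simp
  | cons a l ih => simp [List.foldl_cons, ih, pvStepA_eq_get, List.filterMap_cons]
                   cases pvMapping.get? a <;> simp

-- B's fused pass equals mapping first and then A's dedup loop, given seen ↔ result membership
theorem pvFuse (l : List String) (seen : PySem.Set String) (res : List String)
    (h : ∀ x : String, x ∈ seen ↔ x ∈ res) :
    (l.foldl pvStepB (seen, res)).2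
      = (l.filterMap (fun it => pvMapping.get? it)).foldl
          (fun new_k elem => if elem ∈ new_k then new_k else new_k ++ [elem]) res := by
  induction l generalizing seen res with
  | nil => simp
  | cons a l ih =>
    simp only [List.foldl_cons, List.filterMap_cons, pvStepB]
    cases hm : pvMapping.get? a with
    | none => exact ih seen res h
    | some lab =>
      simp only [List.foldl_cons]
      by_cases hs : lab ∈ seen
      · have hc : PySem.Set.contains seen lab = true := by
          simp only [PySem.Set.contains]; exact List.contains_iff_mem.mpr hs
        rw [hc, if_pos ((h lab).1 hs)]
        exact ih seen res h
      · have hc : PySem.Set.contains seen lab = false := by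
          cases hcc : PySem.Set.contains seen lab with
          | false => rfl
          | true => exact absurd (List.contains_iff_mem.mp (by simpa [PySem.Set.contains] using hcc)) hs
        rw [hc, if_neg (fun hr => hs ((h lab).2 hr))]
        simp only [Bool.false_eq_true, if_false]
        exact ih (PySem.Set.add seen lab) (res ++ [lab]) (by
          intro x
          rw [PySem.Set.mem_add]
          simp [h x, or_comm])

-- ===== VERDICT (by name: the statement is the Claim_ definition above) =====
theorem regroup_hash_spec : Claim_equal_regroup_hash := by
  intro lst _
  unfold Spec_regroup_hash regroup_hash regroup_hash_alt
  rw [pvFoldA_eq_filterMap, pvFuse lst PySem.Set.empty [] (by simp [PySem.Set.empty])]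
  simp
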